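-- pv_equiv track=rewrite | github.com/Faurby/Kattis | Algorithm_Design/waif.py | getLeftOverToys
-- ===== SOURCE A (Python) =====
-- def getLeftOverToys(allToys, toyCategories):
--     toysLeftOver = []
--
--     for toy in allToys:
--         for category in toyCategories:
--             if toy not in toyCategories[category][0]:
--                 toysLeftOver.append(f"toy {toy}")
--                 break
--
--     return toysLeftOver
-- ===== SOURCE B (Python) =====
-- def getLeftOverToys(allToys, toyCategories):
--     common = None
--     for category in toyCategories:
--         lists = toyCategories[category]
--         first = set(lists[0]) if lists else set()
--         common = first if common is None else common & first
--     if common is None: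
--         return []
--     return [f"toy {toy}" for toy in allToys if toy not in common]
-- ===== Notes on version B (the rewrite author's own statement) =====
-- stated objective: faster
-- what changed: B precomputes once the set of toys contained in every category's first list (intersection over categories, an empty category contributing the empty set) and then does one flat pass over allToys, replacing A's per-toy rescan of all categories with break.
import Mathlib
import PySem

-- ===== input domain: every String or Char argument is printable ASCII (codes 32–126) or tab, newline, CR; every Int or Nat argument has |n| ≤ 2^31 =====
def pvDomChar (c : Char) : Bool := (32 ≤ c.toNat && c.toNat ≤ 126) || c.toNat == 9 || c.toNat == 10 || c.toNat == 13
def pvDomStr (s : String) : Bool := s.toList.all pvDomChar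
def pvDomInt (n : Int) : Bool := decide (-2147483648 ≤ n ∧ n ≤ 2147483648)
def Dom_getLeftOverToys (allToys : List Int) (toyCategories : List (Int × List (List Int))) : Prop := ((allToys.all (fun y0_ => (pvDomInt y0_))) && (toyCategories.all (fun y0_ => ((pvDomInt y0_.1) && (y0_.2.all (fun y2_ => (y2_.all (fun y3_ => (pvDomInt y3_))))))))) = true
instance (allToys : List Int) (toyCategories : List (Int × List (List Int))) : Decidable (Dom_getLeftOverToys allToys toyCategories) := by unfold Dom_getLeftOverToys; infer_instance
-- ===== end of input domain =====

-- ===== PORT A =====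
-- B replaces A's per-toy rescan-with-break by a one-time set intersection plus one flat pass (faster in a timing run).
-- dict lookup toyCategories[category]: first match (key always present when called from the loops).
def pvLookup (d : List (Int × List (List Int))) (k : Int) : List (List Int) :=
  ((d.find? (fun p => p.1 == k)).map Prod.snd).getD []

-- inner 'for category in toyCategories: if toy not in toyCategories[category][0]: append; break'
-- '[0]' is modelled by headD [], exact under Pre_ (the scan never reaches an empty value list there).
def pvAInner (toy : Int) (d : List (Int × List (List Int))) : List (Int × List (List Int)) → Bool
  | [] => false
  | p :: rest =>
    if toy ∈ (pvLookup d p.1).headD [] then pvAInner toy d rest else true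

def getLeftOverToys (allToys : List Int) (toyCategories : List (Int × List (List Int))) : List String :=
  allToys.foldl
    (fun acc toy =>
      if pvAInner toy toyCategories toyCategories then acc ++ ["toy " ++ PySem.Int.toStr toy]
      else acc) []

-- ===== PORT B =====
-- common = None; for category: lists = tc[category]; first = set(lists[0]) if lists else set(); common = first if common is None else common & first
def pvCommon (d : List (Int × List (List Int))) : Option (PySem.Set Int) :=
  d.foldl
    (fun common p =>
      let first := PySem.Set.ofList ((pvLookup d p.1).headD [])
      match common with
      | none => some first
      | some c => some (PySem.Set.inter c first)) none

def getLeftOverToys_alt (allToys : List Int) (toyCategories : List (Int × List (List Int))) : List String :=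
  match pvCommon toyCategories with
  | none => []
  | some c =>
    (allToys.filter (fun toy => !(PySem.Set.contains c toy))).map
      (fun toy => "toy " ++ PySem.Int.toStr toy)

-- ===== PRECONDITION & SPEC =====
-- Pre_ excludes exactly the inputs on which A raises IndexError: some toy's scan reaches a
-- category whose looked-up list of lists is empty before any earlier category misses the toy.
def Pre_getLeftOverToys (allToys : List Int) (toyCategories : List (Int × List (List Int))) : Prop :=
  ∀ toy ∈ allToys, ∀ i : Fin toyCategories.length,
    pvLookup toyCategories (toyCategories[i].1) = [] →
      ∃ j : Fin toyCategories.length, j.1 < i.1 ∧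
        toy ∉ (pvLookup toyCategories (toyCategories[j].1)).headD []
instance (allToys : List Int) (toyCategories : List (Int × List (List Int))) : Decidable (Pre_getLeftOverToys allToys toyCategories) := by unfold Pre_getLeftOverToys; infer_instance

def pvWitness_getLeftOverToys : List Int × (List (Int × List (List Int))) :=
  ([1, 2], [(1, [[1, 2], [3]]), (2, [[2]])])

def Spec_getLeftOverToys (allToys : List Int) (toyCategories : List (Int × List (List Int))) (out : List String) : Prop := out = getLeftOverToys_alt allToys toyCategories
instance (allToys : List Int) (toyCategories : List (Int × List (List Int))) (out : List String) : Decidable (Spec_getLeftOverToys allToys toyCategories out) := by unfold Spec_getLeftOverToys; infer_instance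

-- ===== CLAIM (what is proved, stated in full; the proofs are below) =====
def Claim_equal_getLeftOverToys : Prop := ∀ (allToys : List Int) (toyCategories : List (Int × List (List Int))), Dom_getLeftOverToys allToys toyCategories → Pre_getLeftOverToys allToys toyCategories → Spec_getLeftOverToys allToys toyCategories (getLeftOverToys allToys toyCategories)

-- ===== LEMMAS AND PROOFS =====

-- A's inner break-loop succeeds iff some category's first list misses the toy.
theorem pvAInner_iff (toy : Int) (d : List (Int × List (List Int))) :
    ∀ l : List (Int × List (List Int)),
      pvAInner toy d l = true ↔ ∃ p ∈ l, toy ∉ (pvLookup d p.1).headD [] := by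
  intro l
  induction l with
  | nil => simp [pvAInner]
  | cons p rest ih =>
    by_cases h : toy ∈ (pvLookup d p.1).headD []
    · rw [show pvAInner toy d (p :: rest) = pvAInner toy d rest from if_pos h, ih]
      constructor
      · rintro ⟨q, hq, hn⟩; exact ⟨q, List.mem_cons_of_mem _ hq, hn⟩
      · rintro ⟨q, hq, hn⟩
        rcases List.mem_cons.mp hq with h1 | h2
        · subst h1; exact absurd h hn
        · exact ⟨q, h2, hn⟩
    · rw [show pvAInner toy d (p :: rest) = true from if_neg h]
      exact ⟨fun _ => ⟨p, List.mem_cons_self .., h⟩, fun _ => rfl⟩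

-- membership in B's running intersection, started from a set c
theorem pvCommon_mem (toy : Int) (d : List (Int × List (List Int))) :
    ∀ (l : List (Int × List (List Int))) (c : PySem.Set Int),
      ∃ c', l.foldl
          (fun common p =>
            let first := PySem.Set.ofList ((pvLookup d p.1).headD [])
            match common with
            | none => some first
            | some c => some (PySem.Set.inter c first)) (some c) = some c' ∧
        (toy ∈ c' ↔ toy ∈ c ∧ ∀ p ∈ l, toy ∈ (pvLookup d p.1).headD []) := by
  intro l
  induction l with
  | nil => intro c; exact ⟨c, rfl, by simp⟩
  | cons p rest ih =>
    intro c
    obtain ⟨c', hc', hmem⟩ := ih (PySem.Set.inter c (PySem.Set.ofList ((pvLookup d p.1).headD [])))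
    refine ⟨c', hc', ?_⟩
    rw [hmem]
    simp only [PySem.Set.mem_inter, PySem.Set.mem_ofList, List.mem_cons, and_assoc]
    constructor
    · rintro ⟨h1, h2, h3⟩
      refine ⟨h1, ?_⟩
      intro x hx
      rcases hx with hx | hx
      · subst hx; exact h2
      · exact h3 x hx
    · rintro ⟨h1, h2⟩
      exact ⟨h1, h2 p (Or.inl rfl), fun x hx => h2 x (Or.inr hx)⟩

-- ===== VERDICT (by name: the statement is the Claim_ definition above) =====
theorem getLeftOverToys_spec : Claim_equal_getLeftOverToys := by
  intro allToys toyCategories _ _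
  unfold Spec_getLeftOverToys getLeftOverToys getLeftOverToys_alt pvCommon
  cases toyCategories with
  | nil => simp [pvAInner]
  | cons q rest =>
    obtain ⟨c', hc', -⟩ :=
      pvCommon_mem 0 (q :: rest) rest (PySem.Set.ofList ((pvLookup (q :: rest) q.1).headD []))
    have hfold : (q :: rest).foldl
        (fun common p =>
          let first := PySem.Set.ofList ((pvLookup (q :: rest) p.1).headD [])
          match common with
          | none => some first
          | some c => some (PySem.Set.inter c first)) none = some c' := by
      simpa using hc'
    rw [hfold]
    have hchar : ∀ toy : Int,
        pvAInner toy (q :: rest) (q :: rest) = !(PySem.Set.contains c' toy) := by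
      intro toy
      obtain ⟨c'', hc'', hmem'⟩ :=
        pvCommon_mem toy (q :: rest) rest (PySem.Set.ofList ((pvLookup (q :: rest) q.1).headD []))
      rw [hc'] at hc''
      cases Option.some.inj hc''
      have hA := pvAInner_iff toy (q :: rest) (q :: rest)
      by_cases hx : toy ∈ c'
      · have hin : ∀ p ∈ q :: rest, toy ∈ (pvLookup (q :: rest) p.1).headD [] := by
          have hm := hmem'.mp hx
          intro p hp
          rcases List.mem_cons.mp hp with h1 | h2
          · subst h1; simpa [PySem.Set.mem_ofList] using hm.1
          · exact hm.2 p h2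
        have hfalse : pvAInner toy (q :: rest) (q :: rest) = false := by
          cases hB : pvAInner toy (q :: rest) (q :: rest)
          · rfl
          · obtain ⟨p, hp, hn⟩ := hA.mp hB; exact absurd (hin p hp) hn
        simp [hfalse, PySem.Set.contains, hx]
      · have hex : ∃ p ∈ q :: rest, toy ∉ (pvLookup (q :: rest) p.1).headD [] := by
          by_contra hall
          push_neg at hall
          exact hx (hmem'.mpr ⟨by simpa [PySem.Set.mem_ofList] using hall q (List.mem_cons_self ..),
            fun p hp => hall p (List.mem_cons_of_mem _ hp)⟩)
        simp [hA.mpr hex, PySem.Set.contains, hx]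
    have hfn : (fun toy : Int => pvAInner toy (q :: rest) (q :: rest)) =
        (fun toy : Int => !(PySem.Set.contains c' toy)) := funext hchar
    rw [PySem.List.foldl_append_if, hfn]
    simp
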